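-- pv_equiv track=rewrite | github.com/Yuqing-Gao/Bachelors-Thesis | code/test.py | w2_calculation
-- ===== SOURCE A (Python) =====
-- def w2_calculation(lst):
--     total_sum = 0
--     for k in range(len(lst) - 1):
--         inner_sum = 0
--         for j in range(len(lst) - 1):
--             inner_sum += lst[j] ** 2 - lst[j] * lst[k]
--         total_sum += (lst[k + 1] - lst[k]) * inner_sum
--     return total_sum
-- ===== SOURCE B (Python) =====
-- def w2_calculation(lst):
--     xs = lst[:-1]
--     s1 = sum(xs)
--     s2 = sum(x * x for x in xs)
--     return sum((lst[k + 1] - lst[k]) * (s2 - s1 * lst[k]) for k in range(len(lst) - 1))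
-- ===== Notes on version B (the rewrite author's own statement) =====
-- stated objective: faster
-- what changed: Replaces the O(n^2) nested loop by precomputing the sum and sum of squares of lst[:-1] once, then a single pass computing each inner sum in O(1) as s2 - s1*lst[k].
import Mathlib
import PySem

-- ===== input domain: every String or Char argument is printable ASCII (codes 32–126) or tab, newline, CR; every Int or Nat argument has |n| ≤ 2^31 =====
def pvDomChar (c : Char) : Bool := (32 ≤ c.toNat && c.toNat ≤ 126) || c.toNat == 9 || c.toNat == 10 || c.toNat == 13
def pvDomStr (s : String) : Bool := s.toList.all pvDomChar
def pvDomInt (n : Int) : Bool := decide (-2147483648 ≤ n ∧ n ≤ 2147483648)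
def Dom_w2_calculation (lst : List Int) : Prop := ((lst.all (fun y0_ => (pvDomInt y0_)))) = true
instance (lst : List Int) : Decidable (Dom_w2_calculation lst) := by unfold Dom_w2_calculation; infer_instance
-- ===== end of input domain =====

-- ===== PORT A =====
-- B changes: replaces A's O(n^2) nested loop by precomputed sums and one pass (objective: faster).
def w2_calculation (lst : List Int) : Int :=
  (PySem.List.pyRange 0 ((lst.length : Int) - 1) 1).foldl
    (fun total k =>
      let inner :=
        (PySem.List.pyRange 0 ((lst.length : Int) - 1) 1).foldl
          (fun inner j =>
            inner + PySem.List.pyGetD lst j 0 ^ 2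
              - PySem.List.pyGetD lst j 0 * PySem.List.pyGetD lst k 0) 0
      total + (PySem.List.pyGetD lst (k + 1) 0 - PySem.List.pyGetD lst k 0) * inner) 0

-- ===== PORT B =====
def w2_calculation_alt (lst : List Int) : Int :=
  let xs := PySem.List.slice lst none (some (-1))
  let s1 := xs.sum
  let s2 := (xs.map (fun x => x * x)).sum
  ((PySem.List.pyRange 0 ((lst.length : Int) - 1) 1).map
    (fun k => (PySem.List.pyGetD lst (k + 1) 0 - PySem.List.pyGetD lst k 0)
      * (s2 - s1 * PySem.List.pyGetD lst k 0))).sum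

-- ===== PRECONDITION & SPEC =====
def Spec_w2_calculation (lst : List Int) (out : Int) : Prop := out = w2_calculation_alt lst
instance (lst : List Int) (out : Int) : Decidable (Spec_w2_calculation lst out) := by unfold Spec_w2_calculation; infer_instance

-- ===== CLAIM (what is proved, stated in full; the proofs are below) =====
def Claim_equal_w2_calculation : Prop := ∀ (lst : List Int), Dom_w2_calculation lst → Spec_w2_calculation lst (w2_calculation lst)

-- ===== LEMMAS AND PROOFS =====

-- sum of the combined terms splits into the two precomputed sums
theorem pv_sum_comb (xs : List Int) (c : Int) :
    (xs.map (fun x => x ^ 2 - x * c)).sum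
      = (xs.map (fun x => x * x)).sum - xs.sum * c := by
  induction xs with
  | nil => simp
  | cons x xs ih => simp [ih]; ring

-- the inner loop of A computes s2 - s1*c for any multiplier c
theorem pv_inner (lst : List Int) (c : Int) :
    (PySem.List.pyRange 0 ((lst.length : Int) - 1) 1).foldl
        (fun inner j =>
          inner + PySem.List.pyGetD lst j 0 ^ 2 - PySem.List.pyGetD lst j 0 * c) 0
      = (lst.dropLast.map (fun x => x * x)).sum - lst.dropLast.sum * c := by
  cases lst with
  | nil => simp [PySem.List.pyRange]
  | cons a l =>
    have hlen : ((a :: l).length : Int) - 1 = PySem.List.len ((a :: l).dropLast) := by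
      simp [PySem.List.len_eq]
    rw [hlen]
    rw [PySem.List.foldl_congr_mem _ _
      (fun acc j => acc + (PySem.List.pyGetD ((a :: l).dropLast) j 0 ^ 2
        - PySem.List.pyGetD ((a :: l).dropLast) j 0 * c)) 0 ?_]
    · rw [PySem.List.foldl_pyRange_pyGetD ((a :: l).dropLast) 0
        (fun acc x => acc + (x ^ 2 - x * c)) 0 le_rfl]
      simp only [Int.toNat_zero, List.drop_zero]
      rw [PySem.List.foldl_add _ (fun x => x ^ 2 - x * c) 0, pv_sum_comb]
      ring
    · intro acc j hj
      rw [PySem.List.mem_pyRange_one] at hj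
      have hj2 : j < ((a :: l).dropLast.length : Int) := by
        simpa [PySem.List.len_eq] using hj.2
      have hgd : PySem.List.pyGetD ((a :: l).dropLast) j 0 = PySem.List.pyGetD (a :: l) j 0 := by
        have h1 := PySem.List.pyGetD_eq_getElem ((a :: l).dropLast) 0 hj.1 hj2
        have hj3 : j < ((a :: l).length : Int) := by
          have := hj2; simp at this ⊢; omega
        have h2 := PySem.List.pyGetD_eq_getElem (a :: l) 0 hj.1 hj3
        rw [h1, h2, List.getElem_dropLast]
      simp only [hgd]; ring

-- ===== VERDICT (by name: the statement is the Claim_ definition above) =====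
theorem w2_calculation_spec : Claim_equal_w2_calculation := by
  intro lst _
  unfold Spec_w2_calculation w2_calculation w2_calculation_alt
  simp only [PySem.List.slice_to_neg_one]
  rw [PySem.List.foldl_congr_mem _ _
    (fun total k => total + ((PySem.List.pyGetD lst (k + 1) 0 - PySem.List.pyGetD lst k 0)
      * ((lst.dropLast.map (fun x => x * x)).sum
        - lst.dropLast.sum * PySem.List.pyGetD lst k 0))) 0 ?_]
  · rw [PySem.List.foldl_add]
    simp
  · intro acc k _
    have h := pv_inner lst (PySem.List.pyGetD lst k 0)
    simp only [h]
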